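-- pv_equiv track=rewrite | github.com/Wpawlina/AGH-ITCS-Course | cwiczenia/tablice jednowymiarowe 3/sumaIndeksów192.py | zad19
-- ===== SOURCE A (Python) =====
-- def zad19(t):
--     n=len(t)
--     p=0
--     k=0
--     suma=t[0]
--     sumai=0
--     maxl=0
--     if suma==sumai:
--         maxl=1
--     while k<n-1:
--         if t[k+1]>t[k]:
--             suma+=t[k+1]
--             sumai+=k+1
--             k+=1
--             if suma==sumai:
--                 maxl=max(maxl,k-p+1)
--         else:
--             k+=1
--             p=k
--             suma+=t[k]
--             sumai+=k
--             if suma==sumai: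
--                 maxl=max(maxl,k-p+1)
--     return maxl
-- ===== SOURCE B (Python) =====
-- def zad19(t):
--     n = len(t)
--     pref = []
--     s = 0
--     for x in t:
--         s += x
--         pref.append(s)
--     start = []
--     b = 0
--     for k in range(n):
--         if k > 0 and t[k] <= t[k - 1]:
--             b = k
--         start.append(b)
--     lengths = [k - start[k] + 1 for k in range(n) if 2 * pref[k] == k * (k + 1)]
--     return max(lengths, default=0)
-- ===== Notes on version B (the rewrite author's own statement) =====
-- stated objective: alternative
-- what changed: Replaces A's single fused while-loop with three accumulators by a staged pipeline: one pass materialises the prefix-sum list, a second pass materialises the run-start list, then a comprehension collects the run lengths at indices where twice the prefix sum equals k*(k+1) and Python's max with default 0 is taken; the index-sum accumulator disappears into the closed form.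
import Mathlib
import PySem

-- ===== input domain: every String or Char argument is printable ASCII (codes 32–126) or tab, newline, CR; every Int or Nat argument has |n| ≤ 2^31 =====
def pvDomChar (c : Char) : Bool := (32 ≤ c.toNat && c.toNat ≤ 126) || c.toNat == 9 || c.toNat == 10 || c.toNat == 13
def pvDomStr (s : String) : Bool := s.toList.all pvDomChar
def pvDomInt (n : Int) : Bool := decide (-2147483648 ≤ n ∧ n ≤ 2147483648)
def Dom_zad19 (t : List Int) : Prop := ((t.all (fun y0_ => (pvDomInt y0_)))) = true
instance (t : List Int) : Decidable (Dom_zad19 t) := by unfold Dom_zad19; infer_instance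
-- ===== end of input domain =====

-- B replaces A's fused while-loop with a staged pipeline: a prefix-sum list, a run-start
-- list, then a comprehension of run lengths at indices with 2*pref == k*(k+1) and max(,default=0)
-- (objective: alternative decomposition, same O(n) cost).

-- ===== PORT A =====
-- while k < n-1 loop; fuel = number of remaining iterations (n-1-k), state (p, k, suma, sumai, maxl)
def zad19Go (t : List Int) (fuel : Nat) (p k suma sumai maxl : Int) : Int :=
  match fuel with
  | 0 => maxl
  | Nat.succ f =>
    if PySem.List.pyGetD t (k + 1) 0 > PySem.List.pyGetD t k 0 then
      zad19Go t f p (k + 1) (suma + PySem.List.pyGetD t (k + 1) 0) (sumai + (k + 1))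
        (if suma + PySem.List.pyGetD t (k + 1) 0 = sumai + (k + 1) then
          max maxl ((k + 1) - p + 1) else maxl)
    else
      zad19Go t f (k + 1) (k + 1) (suma + PySem.List.pyGetD t (k + 1) 0) (sumai + (k + 1))
        (if suma + PySem.List.pyGetD t (k + 1) 0 = sumai + (k + 1) then
          max maxl ((k + 1) - (k + 1) + 1) else maxl)

def zad19 (t : List Int) : Int :=
  let n : Int := PySem.List.len t
  let suma := PySem.List.pyGetD t 0 0    -- the initial read of the first element; Pre_ excludes the empty list, where Python raises IndexError
  let maxl : Int := if suma = 0 then 1 else 0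
  zad19Go t (n - 1).toNat 0 0 suma 0 maxl

-- ===== PORT B =====
-- first pass: materialise the prefix-sum list (for x in t: s += x; pref.append(s))
def bPref (t : List Int) : List Int :=
  (t.foldl (fun (st : Int × List Int) x => (st.1 + x, st.2 ++ [st.1 + x]))
    ((0 : Int), ([] : List Int))).2

-- second pass: materialise the run-start list (reset b to k on a non-increase)
def bStart (t : List Int) : List Int :=
  ((PySem.List.pyRange 0 (PySem.List.len t) 1).foldl
    (fun (st : Int × List Int) k =>
      let b := if k > 0 ∧ PySem.List.pyGetD t k 0 ≤ PySem.List.pyGetD t (k - 1) 0 then k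
               else st.1
      (b, st.2 ++ [b]))
    ((0 : Int), ([] : List Int))).2

def zad19_alt (t : List Int) : Int :=
  let n : Int := PySem.List.len t
  let pref := bPref t
  let start := bStart t
  let lengths := ((PySem.List.pyRange 0 n 1).filter
      (fun k => 2 * PySem.List.pyGetD pref k 0 == k * (k + 1))).map
      (fun k => k - PySem.List.pyGetD start k 0 + 1)
  (PySem.List.max? lengths (fun x => x)).getD 0

-- ===== PRECONDITION & SPEC =====
-- Pre_ excludes only the empty list, on which A raises IndexError reading t[0].
def Pre_zad19 (t : List Int) : Prop := t ≠ []
instance (t : List Int) : Decidable (Pre_zad19 t) := by unfold Pre_zad19; infer_instance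
def pvWitness_zad19 : List Int := ([1, 2, 0])

def Spec_zad19 (t : List Int) (out : Int) : Prop := out = zad19_alt t
instance (t : List Int) (out : Int) : Decidable (Spec_zad19 t out) := by unfold Spec_zad19; infer_instance

-- ===== CLAIM (what is proved, stated in full; the proofs are below) =====
def Claim_equal_zad19 : Prop := ∀ (t : List Int), Dom_zad19 t → Pre_zad19 t → Spec_zad19 t (zad19 t)

-- ===== LEMMAS AND PROOFS =====

-- reference quantities (proof-only): prefix sum, run start, and the forward best-so-far loop
def refP (t : List Int) (k : Nat) : Int := (t.take (k + 1)).sum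

def refRS (t : List Int) : Nat → Int
  | 0 => 0
  | Nat.succ k =>
      if PySem.List.pyGetD t ((k : Int) + 1) 0 ≤ PySem.List.pyGetD t (k : Int) 0 then (k : Int) + 1
      else refRS t k

def bestGo (t : List Int) : Nat → Int → Nat → Int
  | _, m, 0 => m
  | k, m, Nat.succ f =>
      bestGo t (k + 1)
        (if 2 * refP t (k + 1) = ((k : Int) + 1) * ((k : Int) + 2) then
          max m (((k : Int) + 1) - refRS t (k + 1) + 1) else m) f

theorem tri_double (k : Int) : 2 * PySem.Int.floordiv (k * (k + 1)) 2 = k * (k + 1) := by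
  have hdvd : (2 : Int) ∣ k * (k + 1) := (Int.even_mul_succ_self k).two_dvd
  have h0 : PySem.Int.mod (k * (k + 1)) 2 = 0 := (PySem.Int.mod_eq_zero_iff_dvd _ _).mpr hdvd
  have h := PySem.Int.floordiv_mul_add_mod (k * (k + 1)) 2
  omega

theorem refP_succ (t : List Int) (k : Nat) (hk : k + 1 < t.length) :
    refP t (k + 1) = refP t k + PySem.List.pyGetD t ((k : Int) + 1) 0 := by
  have h1 : (k : Int) + 1 = ((k + 1 : Nat) : Int) := by push_cast; ring
  rw [h1, PySem.List.pyGetD_natCast]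
  unfold refP
  show (t.take (k + 1 + 1)).sum = _
  rw [List.sum_take_succ t (k + 1) hk]
  simp [List.getD_eq_getElem?_getD, List.getElem?_eq_getElem hk]

theorem refP_zero (t : List Int) (ht : t ≠ []) :
    refP t 0 = PySem.List.pyGetD t 0 0 := by
  cases t with
  | nil => exact absurd rfl ht
  | cons a l => simp [refP, PySem.List.pyGetD_zero_cons]

-- A-side: the while loop computes the forward best-so-far loop
theorem tri_succ (k : Int) :
    PySem.Int.floordiv ((k + 1) * (k + 1 + 1)) 2 = PySem.Int.floordiv (k * (k + 1)) 2 + (k + 1) := by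
  have h1 := tri_double k
  have h2 := tri_double (k + 1)
  nlinarith [h1, h2]

theorem A_loop (t : List Int) :
    ∀ (f k : Nat) (maxl : Int), (k + 1) + f = t.length →
    zad19Go t f (refRS t k) (k : Int) (refP t k)
      (PySem.Int.floordiv ((k : Int) * ((k : Int) + 1)) 2) maxl = bestGo t k maxl f := by
  intro f
  induction f with
  | zero => intro k maxl _; rfl
  | succ f ih =>
    intro k maxl hlen
    have hklt : k + 1 < t.length := by omega
    have hsuma := refP_succ t k hklt
    have htri := tri_succ (k : Int)
    have hd := tri_double ((k : Int) + 1)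
    have hcast : ((k + 1 : Nat) : Int) = (k : Int) + 1 := by push_cast; ring
    rw [zad19Go, bestGo]
    by_cases hgt : PySem.List.pyGetD t ((k : Int) + 1) 0 > PySem.List.pyGetD t (k : Int) 0
    · rw [if_pos hgt]
      have hrs : refRS t (k + 1) = refRS t k := by
        show (if PySem.List.pyGetD t ((k : Int) + 1) 0 ≤ PySem.List.pyGetD t (k : Int) 0
              then (k : Int) + 1 else refRS t k) = refRS t k
        rw [if_neg (by omega)]
      have hM : (if refP t k + PySem.List.pyGetD t ((k : Int) + 1) 0
            = PySem.Int.floordiv ((k : Int) * ((k : Int) + 1)) 2 + ((k : Int) + 1)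
          then max maxl (((k : Int) + 1) - refRS t k + 1) else maxl)
          = (if 2 * refP t (k + 1) = ((k : Int) + 1) * ((k : Int) + 2) then
              max maxl (((k : Int) + 1) - refRS t (k + 1) + 1) else maxl) := by
        rw [hrs]
        refine if_congr ?_ rfl rfl
        rw [← hsuma, ← htri]
        constructor <;> intro h <;> nlinarith [hd]
      rw [hM]
      generalize (if 2 * refP t (k + 1) = ((k : Int) + 1) * ((k : Int) + 2) then
          max maxl (((k : Int) + 1) - refRS t (k + 1) + 1) else maxl) = M2
      have H := ih (k + 1) M2 (by omega)
      rw [hrs, hcast, htri, hsuma] at H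
      exact H
    · rw [if_neg hgt]
      have hrs : refRS t (k + 1) = (k : Int) + 1 := by
        show (if PySem.List.pyGetD t ((k : Int) + 1) 0 ≤ PySem.List.pyGetD t (k : Int) 0
              then (k : Int) + 1 else refRS t k) = (k : Int) + 1
        rw [if_pos (by omega)]
      have hM : (if refP t k + PySem.List.pyGetD t ((k : Int) + 1) 0
            = PySem.Int.floordiv ((k : Int) * ((k : Int) + 1)) 2 + ((k : Int) + 1)
          then max maxl (((k : Int) + 1) - ((k : Int) + 1) + 1) else maxl)
          = (if 2 * refP t (k + 1) = ((k : Int) + 1) * ((k : Int) + 2) then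
              max maxl (((k : Int) + 1) - refRS t (k + 1) + 1) else maxl) := by
        rw [hrs]
        refine if_congr ?_ rfl rfl
        rw [← hsuma, ← htri]
        constructor <;> intro h <;> nlinarith [hd]
      rw [hM]
      generalize (if 2 * refP t (k + 1) = ((k : Int) + 1) * ((k : Int) + 2) then
          max maxl (((k : Int) + 1) - refRS t (k + 1) + 1) else maxl) = M2
      have H := ih (k + 1) M2 (by omega)
      rw [hrs, hcast, htri, hsuma] at H
      exact H

-- B-side, stage 1: the prefix-sum list reads back as refP
def scanS (s : Int) : List Int → List Int
  | [] => []
  | x :: xs => (s + x) :: scanS (s + x) xs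

theorem bPref_fold : ∀ (l : List Int) (s : Int) (acc : List Int),
    (l.foldl (fun (st : Int × List Int) x => (st.1 + x, st.2 ++ [st.1 + x])) (s, acc)).2
      = acc ++ scanS s l := by
  intro l
  induction l with
  | nil => intro s acc; simp [scanS]
  | cons x xs ih => intro s acc; simp [scanS, ih]

theorem scanS_getD : ∀ (l : List Int) (k : Nat) (s : Int), k < l.length →
    (scanS s l).getD k 0 = s + (l.take (k + 1)).sum := by
  intro l
  induction l with
  | nil => intro k s hk; simp at hk
  | cons x xs ih =>
    intro k s hk
    cases k with
    | zero => simp [scanS]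
    | succ k =>
      have := ih k (s + x) (by simpa using hk)
      simp only [scanS, List.getD_cons_succ, List.take_succ_cons, List.sum_cons]
      rw [this]; ring

theorem pref_get (t : List Int) (k : Nat) (hk : k < t.length) :
    PySem.List.pyGetD (bPref t) (k : Int) 0 = refP t k := by
  rw [PySem.List.pyGetD_natCast]
  unfold bPref
  rw [bPref_fold t 0 []]
  simpa [refP] using scanS_getD t k 0 hk

-- B-side, stage 2: the run-start list reads back as refRS
def rsP (t : List Int) : Nat → Int
  | 0 => 0
  | Nat.succ m => refRS t m

theorem bStart_fold (t : List Int) : ∀ (m : Nat),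
    ((PySem.List.pyRange 0 (m : Int) 1).foldl
      (fun (st : Int × List Int) k =>
        let b := if k > 0 ∧ PySem.List.pyGetD t k 0 ≤ PySem.List.pyGetD t (k - 1) 0 then k
                 else st.1
        (b, st.2 ++ [b]))
      ((0 : Int), ([] : List Int)))
    = (rsP t m, (List.range m).map (fun j => refRS t j)) := by
  intro m
  induction m with
  | zero => rw [PySem.List.pyRange_one_eq_nil (by norm_num)]; rfl
  | succ m ih =>
    rw [show ((m + 1 : Nat) : Int) = (m : Int) + 1 by push_cast; ring,
        PySem.List.pyRange_one_succ_right (by positivity), List.foldl_append, ih]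
    simp only [List.foldl_cons, List.foldl_nil]
    have hb : (if (m : Int) > 0 ∧ PySem.List.pyGetD t (m : Int) 0 ≤ PySem.List.pyGetD t ((m : Int) - 1) 0
        then (m : Int) else rsP t m) = refRS t m := by
      cases m with
      | zero => rw [if_neg (by norm_num)]; rfl
      | succ j =>
        have h1 : ((j + 1 : Nat) : Int) = (j : Int) + 1 := by push_cast; ring
        have h2 : ((j + 1 : Nat) : Int) - 1 = (j : Int) := by push_cast; ring
        show (if _ ∧ PySem.List.pyGetD t ((j + 1 : Nat) : Int) 0 ≤ PySem.List.pyGetD t (((j + 1 : Nat) : Int) - 1) 0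
            then ((j + 1 : Nat) : Int) else refRS t j)
          = (if PySem.List.pyGetD t ((j : Int) + 1) 0 ≤ PySem.List.pyGetD t (j : Int) 0 then (j : Int) + 1
            else refRS t j)
        rw [h1, show (j : Int) + 1 - 1 = (j : Int) by ring]
        by_cases hle : PySem.List.pyGetD t ((j : Int) + 1) 0 ≤ PySem.List.pyGetD t (j : Int) 0
        · rw [if_pos ⟨by positivity, hle⟩, if_pos hle]
        · rw [if_neg (by tauto), if_neg hle]
    simp only [hb]
    rw [List.range_succ]
    simp [rsP]

theorem start_get (t : List Int) (k : Nat) (hk : k < t.length) :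
    PySem.List.pyGetD (bStart t) (k : Int) 0 = refRS t k := by
  rw [PySem.List.pyGetD_natCast]
  unfold bStart
  rw [PySem.List.len_eq, bStart_fold t t.length]
  rw [List.getD_eq_getElem?_getD, List.getElem?_map, List.getElem?_range hk]
  rfl

-- B-side, stage 3: max(default 0) of a list of elements ≥ 1 is the running-max fold from 0
theorem max_getD_eq_foldl (L : List Int) (h : ∀ y ∈ L, 1 ≤ y) :
    (PySem.List.max? L (fun x => x)).getD 0 = L.foldl max 0 := by
  cases L with
  | nil => simp [PySem.List.max?]
  | cons x l =>
    rw [PySem.List.max?_id_cons]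
    have hx : max 0 x = x := by
      have := h x (by simp)
      omega
    simp [hx]

theorem refRS_bounds (t : List Int) : ∀ (k : Nat), 0 ≤ refRS t k ∧ refRS t k ≤ (k : Int) := by
  intro k
  induction k with
  | zero => exact ⟨le_refl 0, le_refl 0⟩
  | succ k ih =>
    have hc : ((k + 1 : Nat) : Int) = (k : Int) + 1 := by push_cast; ring
    rw [show refRS t (k + 1) = (if PySem.List.pyGetD t ((k : Int) + 1) 0 ≤ PySem.List.pyGetD t (k : Int) 0
        then (k : Int) + 1 else refRS t k) from rfl, hc]
    split_ifs <;> omega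

-- the filtered-comprehension fold equals the forward best-so-far loop
theorem fold_bestGo (t : List Int) :
    ∀ (f k : Nat) (m : Int), (k + 1) + f ≤ t.length →
    (PySem.List.pyRange ((k : Int) + 1) ((k : Int) + 1 + (f : Int)) 1).foldl
      (fun m j => if (2 * PySem.List.pyGetD (bPref t) j 0 == j * (j + 1)) = true
        then max m (j - PySem.List.pyGetD (bStart t) j 0 + 1) else m) m = bestGo t k m f := by
  intro f
  induction f with
  | zero =>
    intro k m _
    rw [show ((k : Int) + 1 + ((0 : Nat) : Int)) = (k : Int) + 1 by push_cast; ring,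
        PySem.List.pyRange_one_eq_nil (le_refl _)]
    rfl
  | succ f ih =>
    intro k m hlen
    have hklt : k + 1 < t.length := by omega
    have hcast : ((k + 1 : Nat) : Int) = (k : Int) + 1 := by push_cast; ring
    rw [PySem.List.pyRange_one_cons (by push_cast; omega)]
    simp only [List.foldl_cons]
    rw [show (k : Int) + 1 = ((k + 1 : Nat) : Int) from hcast.symm,
        pref_get t (k + 1) hklt, start_get t (k + 1) hklt]
    rw [bestGo]
    have hcond : (2 * refP t (k + 1) == ((k + 1 : Nat) : Int) * (((k + 1 : Nat) : Int) + 1)) = true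
        ↔ 2 * refP t (k + 1) = ((k : Int) + 1) * ((k : Int) + 2) := by
      rw [beq_iff_eq, hcast]
      constructor <;> intro h <;> linarith [h]
    have hMeq : (if (2 * refP t (k + 1) == ((k + 1 : Nat) : Int) * (((k + 1 : Nat) : Int) + 1)) = true
          then max m (((k + 1 : Nat) : Int) - refRS t (k + 1) + 1) else m)
        = (if 2 * refP t (k + 1) = ((k : Int) + 1) * ((k : Int) + 2) then
            max m (((k : Int) + 1) - refRS t (k + 1) + 1) else m) := by
      rw [hcast]
      exact if_congr (by rw [← hcast]; exact hcond) rfl rfl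
    rw [hMeq]
    generalize (if 2 * refP t (k + 1) = ((k : Int) + 1) * ((k : Int) + 2) then
        max m (((k : Int) + 1) - refRS t (k + 1) + 1) else m) = M2
    have H := ih (k + 1) M2 (by omega)
    rw [show ((k + 1 : Nat) : Int) + 1 + ((f : Nat) : Int)
          = ((k + 1 : Nat) : Int) + ((f + 1 : Nat) : Int) by push_cast; ring] at H
    rw [show ((k + 1 : Nat) : Int) = (k : Int) + 1 from hcast] at H
    exact H

-- ===== VERDICT (by name: the statement is the Claim_ definition above) =====
theorem zad19_spec : Claim_equal_zad19 := by
  intro t _ hpre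
  unfold Spec_zad19
  have hn : 1 ≤ t.length := by
    cases t with
    | nil => exact absurd rfl hpre
    | cons a l => simp
  -- A side
  have hA : zad19 t = bestGo t 0 (if refP t 0 = 0 then 1 else 0) (t.length - 1) := by
    unfold zad19
    rw [PySem.List.len_eq, ← refP_zero t hpre]
    show zad19Go t (((t.length : Int) - 1)).toNat 0 0 (refP t 0) 0
        (if refP t 0 = 0 then 1 else 0) = _
    rw [show (((t.length : Int)) - 1).toNat = t.length - 1 by omega]
    have := A_loop t (t.length - 1) 0 (if refP t 0 = 0 then 1 else 0) (by omega)
    simpa [PySem.Int.floordiv] using this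
  -- B side
  have hB : zad19_alt t = bestGo t 0 (if refP t 0 = 0 then 1 else 0) (t.length - 1) := by
    unfold zad19_alt
    have h1 : ∀ y ∈ ((PySem.List.pyRange 0 (PySem.List.len t) 1).filter
        (fun k => 2 * PySem.List.pyGetD (bPref t) k 0 == k * (k + 1))).map
        (fun k => k - PySem.List.pyGetD (bStart t) k 0 + 1), 1 ≤ y := by
      intro y hy
      rcases List.mem_map.mp hy with ⟨j, hj, rfl⟩
      have hjr := List.mem_filter.mp hj
      have hjmem := PySem.List.mem_pyRange_one.mp hjr.1
      rw [PySem.List.len_eq] at hjmem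
      obtain ⟨jn, rfl⟩ : ∃ jn : Nat, (jn : Int) = j := ⟨j.toNat, by omega⟩
      have hjlt : jn < t.length := by omega
      rw [start_get t jn hjlt]
      have := refRS_bounds t jn
      omega
    rw [max_getD_eq_foldl _ h1, List.foldl_map, List.foldl_filter]
    rw [PySem.List.len_eq, PySem.List.pyRange_one_cons (by exact_mod_cast hn)]
    simp only [List.foldl_cons]
    have hp0 : PySem.List.pyGetD (bPref t) 0 0 = refP t 0 := by
      simpa using pref_get t 0 (by omega)
    have hs0 : PySem.List.pyGetD (bStart t) 0 0 = refRS t 0 := by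
      simpa using start_get t 0 (by omega)
    have hstep0 : (if (2 * PySem.List.pyGetD (bPref t) 0 0 == 0 * (0 + 1)) = true
          then max 0 ((0 : Int) - PySem.List.pyGetD (bStart t) 0 0 + 1) else 0)
        = (if refP t 0 = 0 then 1 else 0) := by
      rw [hp0, hs0, show refRS t 0 = 0 from rfl]
      by_cases h0 : refP t 0 = 0
      · rw [if_pos (by rw [beq_iff_eq]; omega), if_pos h0]; norm_num
      · rw [if_neg (by rw [beq_iff_eq]; omega), if_neg h0]
    rw [hstep0]
    have H := fold_bestGo t (t.length - 1) 0 (if refP t 0 = 0 then 1 else 0) (by omega)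
    rw [show ((0 : Nat) : Int) + 1 + ((t.length - 1 : Nat) : Int) = (t.length : Int) by
          push_cast; omega] at H
    exact H
  rw [hA, hB]
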